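-- pv_equiv track=rewrite | github.com/whardier/wap-mms-message | wap_mms_message/encoder.py | encode_long_integer
-- ===== SOURCE A (Python) =====
-- def encode_long_integer(long: int) -> [int]:
--     """
--     Assumes a very long integer that isn't long enough to not be a
--     python long.
--     """
--
--     encoded_long_int = []
--     long_int = long
--
--     while long_int > 0:
--         # chomp chomp
--         byte = 0xff & long_int
--         encoded_long_int.append(byte)
--         long_int = long_int >> 8
--
--     return [len(encoded_long_int)] + encoded_long_int
-- ===== SOURCE B (Python) =====
-- def encode_long_integer(long: int) -> [int]:
--     if long <= 0:
--         return [0]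
--     n = (long.bit_length() + 7) // 8
--     body = list(long.to_bytes(n, 'little'))
--     return [len(body)] + body
-- ===== Notes on version B (the rewrite author's own statement) =====
-- stated objective: idiomatic
-- what changed: Replaces the while-shift-mask loop with an arithmetic byte-length computation ((bit_length()+7)//8) plus the builtin int.to_bytes little-endian conversion.
import Mathlib
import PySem

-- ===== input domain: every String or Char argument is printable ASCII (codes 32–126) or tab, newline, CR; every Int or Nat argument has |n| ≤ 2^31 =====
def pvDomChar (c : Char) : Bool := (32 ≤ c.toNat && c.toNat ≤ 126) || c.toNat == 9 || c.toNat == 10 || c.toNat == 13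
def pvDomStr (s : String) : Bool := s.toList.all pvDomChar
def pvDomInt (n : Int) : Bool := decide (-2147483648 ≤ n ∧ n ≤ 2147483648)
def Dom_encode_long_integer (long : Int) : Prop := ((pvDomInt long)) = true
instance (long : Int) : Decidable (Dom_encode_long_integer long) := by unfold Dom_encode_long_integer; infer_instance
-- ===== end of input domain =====

-- ===== PORT A =====
-- B replaces A's while-shift-mask loop by a byte-length formula plus a direct
-- little-endian byte expansion (idiomatic; same asymptotic cost).

-- termination helper for the while-loop of A (cited by decreasing_by)
theorem pvShiftToNatLt (x : Int) (h : 0 < x) : (x >>> (8:Int)).toNat < x.toNat := by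
  lift x to Nat using le_of_lt h
  have hb : ((x:Int) >>> (8:Int)) = ((x >>> 8 : Nat) : Int) := rfl
  have hm : x >>> 8 = x / 256 := by simp [Nat.shiftRight_eq_div_pow]
  simp only [hb, Int.toNat_natCast, hm]
  exact Nat.div_lt_self (by exact_mod_cast h) (by norm_num)

-- the while-loop: "while long_int > 0: append(0xff & long_int); long_int >>= 8"
def pvChompLoop (long_int : Int) : List Int :=
  if h : long_int > 0 then
    (Int.land 0xff long_int) :: pvChompLoop (long_int >>> (8:Int))
  else []
termination_by long_int.toNat
decreasing_by exact pvShiftToNatLt _ h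

def encode_long_integer (long : Int) : List Int :=
  let encoded_long_int := pvChompLoop long
  ((encoded_long_int.length : Int)) :: encoded_long_int

-- ===== PORT B =====
-- long.to_bytes(n, 'little') as a list of ints: n bytes, least significant first
def pvToBytesLE : Nat → Nat → List Int
  | 0, _ => []
  | k+1, x => ((x % 256 : Nat) : Int) :: pvToBytesLE k (x / 256)

def encode_long_integer_alt (long : Int) : List Int :=
  if long ≤ 0 then [0]
  else
    -- long.bit_length() is Nat.size for a positive int
    let n := (Nat.size long.toNat + 7) / 8
    let body := pvToBytesLE n long.toNat
    ((body.length : Int)) :: body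

-- ===== PRECONDITION & SPEC =====
def Spec_encode_long_integer (long : Int) (out : List Int) : Prop := out = encode_long_integer_alt long
instance (long : Int) (out : List Int) : Decidable (Spec_encode_long_integer long out) := by unfold Spec_encode_long_integer; infer_instance

-- ===== CLAIM (what is proved, stated in full; the proofs are below) =====
def Claim_equal_encode_long_integer : Prop := ∀ (long : Int), Dom_encode_long_integer long → Spec_encode_long_integer long (encode_long_integer long)

-- ===== LEMMAS AND PROOFS =====

theorem pvToBytesLE_length (n x : Nat) : (pvToBytesLE n x).length = n := by
  induction n generalizing x with
  | zero => rfl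
  | succ k ih => simp [pvToBytesLE, ih]

-- byte-length recurrence: for m > 0, (size m + 7)/8 = 1 + (size (m/256) + 7)/8
theorem pvSizeRec (m : Nat) (hm : 0 < m) :
    (Nat.size m + 7) / 8 = 1 + (Nat.size (m / 256) + 7) / 8 := by
  by_cases h : m < 256
  · have h1 : Nat.size m ≤ 8 := Nat.size_le.mpr (by omega)
    have h2 : 0 < Nat.size m := Nat.size_pos.mpr hm
    have h3 : m / 256 = 0 := Nat.div_eq_of_lt h
    rw [h3]
    simp [Nat.size_zero]
    omega
  · -- m ≥ 256 : size m = size (m/256) + 8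
    have h256 : 256 ≤ m := by omega
    set s' := Nat.size (m / 256) with hs'
    have hlt : m / 256 < 2 ^ s' := Nat.lt_size_self _
    have hpos : 0 < m / 256 := Nat.div_pos h256 (by norm_num)
    have hge : 2 ^ (s' - 1) ≤ m / 256 := by
      have : s' - 1 < s' := by
        have := Nat.size_pos.mpr hpos
        omega
      exact Nat.lt_size.mp this
    have hub : m < 2 ^ (s' + 8) := by
      have : m < 256 * (m / 256 + 1) := by
        have := Nat.div_add_mod m 256
        have := Nat.mod_lt m (show 0 < 256 by norm_num)
        omega
      calc m < 256 * (m / 256 + 1) := this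
        _ ≤ 256 * 2 ^ s' := by
              have : m / 256 + 1 ≤ 2 ^ s' := hlt
              exact Nat.mul_le_mul_left _ this
        _ = 2 ^ (s' + 8) := by ring
    have hlb : 2 ^ (s' + 7) ≤ m := by
      have h1 : 256 * 2 ^ (s' - 1) ≤ 256 * (m / 256) := Nat.mul_le_mul_left _ hge
      have hs1 : 1 ≤ s' := Nat.size_pos.mpr hpos
      have : 256 * 2 ^ (s' - 1) = 2 ^ (s' + 7) := by
        have : s' - 1 + 8 = s' + 7 := by omega
        rw [← this, pow_add]
        ring
      calc 2 ^ (s' + 7) = 256 * 2 ^ (s' - 1) := this.symm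
        _ ≤ 256 * (m / 256) := h1
        _ ≤ m := Nat.mul_div_le m 256
    have hle : Nat.size m ≤ s' + 8 := Nat.size_le.mpr hub
    have hgt : s' + 7 < Nat.size m := Nat.lt_size.mpr hlb
    have hsz : Nat.size m = s' + 8 := by omega
    rw [hsz]
    omega

-- the loop on a nonnegative input produces exactly the little-endian bytes
theorem pvChompLoop_eq (m : Nat) :
    pvChompLoop (m : Int) = pvToBytesLE ((Nat.size m + 7) / 8) m := by
  induction m using Nat.strong_induction_on with
  | _ m ih =>
    by_cases hm : 0 < m
    · have hb1 : Int.land 0xff (m : Int) = ((255 &&& m : Nat) : Int) := rfl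
      have hb2 : ((m : Int) >>> (8:Int)) = ((m >>> 8 : Nat) : Int) := rfl
      have hand : 255 &&& m = m % 256 := by
        simpa [Nat.land_comm] using Nat.and_two_pow_sub_one_eq_mod m 8
      have hshift : m >>> 8 = m / 256 := by simp [Nat.shiftRight_eq_div_pow]
      rw [pvChompLoop, dif_pos (by exact_mod_cast hm), hb1, hb2, hand, hshift,
          ih (m / 256) (Nat.div_lt_self hm (by norm_num)),
          pvSizeRec m hm, Nat.add_comm 1]
      rfl
    · have hm0 : m = 0 := by omega
      subst hm0
      rw [pvChompLoop]
      simp [pvToBytesLE, Nat.size_zero]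

-- for non-positive input the loop body never runs
theorem pvChompLoop_nonpos (x : Int) (h : x ≤ 0) : pvChompLoop x = [] := by
  rw [pvChompLoop, dif_neg (by omega)]

-- ===== VERDICT (by name: the statement is the Claim_ definition above) =====
theorem encode_long_integer_spec : Claim_equal_encode_long_integer := by
  intro long _
  unfold Spec_encode_long_integer encode_long_integer encode_long_integer_alt
  by_cases h : long ≤ 0
  · simp [pvChompLoop_nonpos long h, h]
  · have hpos : 0 < long := by omega
    rw [if_neg h]
    have hcast : ((long.toNat : Nat) : Int) = long := Int.toNat_of_nonneg (le_of_lt hpos)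
    have := pvChompLoop_eq long.toNat
    rw [hcast] at this
    simp only [this, pvToBytesLE_length]
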